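-- pv_equiv track=rewrite | github.com/Ebarron07/Binary-search-app | app.py | run_binary_search
-- ===== SOURCE A (Python) =====
-- def binary_search_steps(numbers, target):
--     steps = []
--     left = 0
--     right = len(numbers) - 1
--     step_number = 1
--
--     while left <= right:
--         mid = (left + right) // 2
--         mid_value = numbers[mid]
--
--         steps.append(
--             f"Step {step_number}: left = {left}, right = {right}, mid = {mid}, middle value = {mid_value}"
--         )
--
--         if mid_value == target:
--             steps.append(f"Target {target} was found at index {mid}.")
--             return f"Found at index {mid}", "\n".join(steps)
--
--         elif mid_value < target:
--             steps.append(
--                 f"{mid_value} is less than {target}, so search the right half."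
--             )
--             left = mid + 1
--
--         else:
--             steps.append(
--                 f"{mid_value} is greater than {target}, so search the left half."
--             )
--             right = mid - 1
--
--         step_number += 1
--
--     steps.append(f"Target {target} was not found in the list.")
--     return "Not found", "\n".join(steps)
--
-- def run_binary_search(user_input, target_input):
--     try:
--         numbers = [int(x.strip()) for x in user_input.split(",") if x.strip() != ""]
--     except ValueError:
--         return (
--             "Invalid input",
--             "Please enter only whole numbers separated by commas."
--         )
--
--     if not numbers:
--         return (
--             "Invalid input",
--             "Please enter at least one number."
--         )
--
--     if numbers != sorted(numbers):
--         return (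
--             "Invalid input",
--             "Binary Search only works on a sorted list. Please enter numbers in increasing order."
--         )
--
--     try:
--         target = int(target_input)
--     except ValueError:
--         return (
--             "Invalid target",
--             "Please enter a whole number as the target."
--         )
--
--     return binary_search_steps(numbers, target)
-- ===== SOURCE B (Python) =====
-- # B: separates the search from the narration: a recursive probe collector
-- # returns (found-index-or-None, list of (left,right,mid) probes); the step
-- # text is then rendered in a second pass over the probe list.
--
-- def _probes(numbers, target, left, right):
--     if left > right:
--         return None, []
--     mid = (left + right) // 2
--     v = numbers[mid]
--     if v == target:
--         return mid, [(left, right, mid)]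
--     if v < target:
--         res, rest = _probes(numbers, target, mid + 1, right)
--     else:
--         res, rest = _probes(numbers, target, left, mid - 1)
--     return res, [(left, right, mid)] + rest
--
--
-- def run_binary_search(user_input, target_input):
--     numbers = []
--     for part in user_input.split(","):
--         p = part.strip()
--         if p == "":
--             continue
--         try:
--             numbers.append(int(p))
--         except ValueError:
--             return (
--                 "Invalid input",
--                 "Please enter only whole numbers separated by commas."
--             )
--
--     if not numbers:
--         return (
--             "Invalid input",
--             "Please enter at least one number."
--         )
--
--     if any(a > b for a, b in zip(numbers, numbers[1:])):
--         return (
--             "Invalid input",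
--             "Binary Search only works on a sorted list. Please enter numbers in increasing order."
--         )
--
--     try:
--         target = int(target_input)
--     except ValueError:
--         return (
--             "Invalid target",
--             "Please enter a whole number as the target."
--         )
--
--     found, probes = _probes(numbers, target, 0, len(numbers) - 1)
--
--     lines = []
--     for i, (l, r, m) in enumerate(probes, 1):
--         v = numbers[m]
--         lines.append(
--             f"Step {i}: left = {l}, right = {r}, mid = {m}, middle value = {v}"
--         )
--         if v == target:
--             lines.append(f"Target {target} was found at index {m}.")
--         elif v < target:
--             lines.append(f"{v} is less than {target}, so search the right half.")
--         else:
--             lines.append(f"{v} is greater than {target}, so search the left half.")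
--
--     if found is None:
--         lines.append(f"Target {target} was not found in the list.")
--         return "Not found", "\n".join(lines)
--     return f"Found at index {found}", "\n".join(lines)
-- ===== Notes on version B (the rewrite author's own statement) =====
-- stated objective: alternative
-- what changed: The fused narrating while-loop is replaced by a recursive probe collector that only records (left,right,mid) triples plus the found index, and a separate second pass that renders all step messages from the probe list; parsing uses an explicit accumulating loop with per-item try and the sortedness check compares adjacent pairs instead of comparing with sorted().
import Mathlib
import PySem

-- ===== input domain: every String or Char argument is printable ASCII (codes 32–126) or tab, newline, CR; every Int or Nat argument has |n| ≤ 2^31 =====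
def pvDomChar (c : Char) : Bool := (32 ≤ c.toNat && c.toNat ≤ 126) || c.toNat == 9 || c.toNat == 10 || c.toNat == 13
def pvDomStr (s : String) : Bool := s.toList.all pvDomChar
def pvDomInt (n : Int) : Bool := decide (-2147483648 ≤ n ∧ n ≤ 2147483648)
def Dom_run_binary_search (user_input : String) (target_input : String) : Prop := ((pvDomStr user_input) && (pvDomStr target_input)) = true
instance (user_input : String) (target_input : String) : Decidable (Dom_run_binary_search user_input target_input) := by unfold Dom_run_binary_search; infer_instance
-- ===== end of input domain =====

-- One honest line: B separates the binary search (a recursive probe collector) from the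
-- narration (a second rendering pass) and validates by adjacent-pair comparison; same results, similar cost.

-- shared message builders (the f-string literals common to both Pythons)
def pvStepLine (sn l r m v : Int) : String :=
  "Step " ++ PySem.Int.toStr sn ++ ": left = " ++ PySem.Int.toStr l ++ ", right = " ++
    PySem.Int.toStr r ++ ", mid = " ++ PySem.Int.toStr m ++ ", middle value = " ++ PySem.Int.toStr v
def pvFoundLine (t m : Int) : String :=
  "Target " ++ PySem.Int.toStr t ++ " was found at index " ++ PySem.Int.toStr m ++ "."
def pvLessLine (v t : Int) : String :=
  PySem.Int.toStr v ++ " is less than " ++ PySem.Int.toStr t ++ ", so search the right half."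
def pvGreaterLine (v t : Int) : String :=
  PySem.Int.toStr v ++ " is greater than " ++ PySem.Int.toStr t ++ ", so search the left half."
def pvNotFoundLine (t : Int) : String :=
  "Target " ++ PySem.Int.toStr t ++ " was not found in the list."

-- ===== PORT A =====
-- the comprehension [int(x.strip()) for x in parts if x.strip() != ""] under one try/except
def pvParseA : List String → Option (List Int)
  | [] => some []
  | x :: rest =>
    if PySem.Str.strip x == "" then pvParseA rest
    else match PySem.Int.ofStr? (PySem.Str.strip x) with
      | none => none
      | some n => (pvParseA rest).map (n :: ·)

-- the while-loop of binary_search_steps; fuel = numbers.length + 1 always suffices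
def pvBssLoop (numbers : List Int) (target : Int) :
    Nat → List String → Int → Int → Int → String × String
  | 0, steps, _, _, _ => ("Not found", PySem.Str.join "\n" steps)  -- unreachable with the fuel supplied
  | fuel + 1, steps, left, right, step_number =>
    if left ≤ right then
      let mid := PySem.Int.floordiv (left + right) 2
      let mid_value := PySem.List.pyGetD numbers mid 0  -- always in range here
      let steps := steps ++ [pvStepLine step_number left right mid mid_value]
      if mid_value == target then
        ("Found at index " ++ PySem.Int.toStr mid,
         PySem.Str.join "\n" (steps ++ [pvFoundLine target mid]))
      else if mid_value < target then
        pvBssLoop numbers target fuel (steps ++ [pvLessLine mid_value target]) (mid + 1) right (step_number + 1)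
      else
        pvBssLoop numbers target fuel (steps ++ [pvGreaterLine mid_value target]) left (mid - 1) (step_number + 1)
    else
      ("Not found", PySem.Str.join "\n" (steps ++ [pvNotFoundLine target]))

def run_binary_search (user_input : String) (target_input : String) : String × String :=
  match pvParseA ((PySem.Str.split? user_input ",").getD []) with
  | none => ("Invalid input", "Please enter only whole numbers separated by commas.")
  | some numbers =>
    if numbers = [] then
      ("Invalid input", "Please enter at least one number.")
    else if numbers ≠ PySem.List.sorted numbers (fun x => x) false then
      ("Invalid input", "Binary Search only works on a sorted list. Please enter numbers in increasing order.")
    else match PySem.Int.ofStr? target_input with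
      | none => ("Invalid target", "Please enter a whole number as the target.")
      | some target =>
        pvBssLoop numbers target (numbers.length + 1) [] 0 ((numbers.length : Int) - 1) 1

-- ===== PORT B =====
-- recursive probe collector: found index (if any) and the (left, right, mid) triples visited
def pvProbes (numbers : List Int) (target : Int) :
    Nat → Int → Int → Option Int × List (Int × Int × Int)
  | 0, _, _ => (none, [])  -- unreachable with the fuel supplied
  | fuel + 1, left, right =>
    if left > right then (none, [])
    else
      let mid := PySem.Int.floordiv (left + right) 2
      let v := PySem.List.pyGetD numbers mid 0
      if v == target then (some mid, [(left, right, mid)])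
      else if v < target then
        let p := pvProbes numbers target fuel (mid + 1) right
        (p.1, (left, right, mid) :: p.2)
      else
        let p := pvProbes numbers target fuel left (mid - 1)
        (p.1, (left, right, mid) :: p.2)

-- the rendering loop body: the two lines one probe contributes
def pvRender (numbers : List Int) (target : Int) (ip : Int × Int × Int × Int) : List String :=
  let v := PySem.List.pyGetD numbers ip.2.2.2 0
  [pvStepLine ip.1 ip.2.1 ip.2.2.1 ip.2.2.2 v,
   if v == target then pvFoundLine target ip.2.2.2
   else if v < target then pvLessLine v target
   else pvGreaterLine v target]

-- the accumulating parse loop of B (early return on the first bad item)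
def pvParseB : List String → List Int → Option (List Int)
  | [], acc => some acc
  | part :: rest, acc =>
    let p := PySem.Str.strip part
    if p == "" then pvParseB rest acc
    else match PySem.Int.ofStr? p with
      | none => none
      | some n => pvParseB rest (acc ++ [n])

def run_binary_search_alt (user_input : String) (target_input : String) : String × String :=
  match pvParseB ((PySem.Str.split? user_input ",").getD []) [] with
  | none => ("Invalid input", "Please enter only whole numbers separated by commas.")
  | some numbers =>
    if numbers = [] then
      ("Invalid input", "Please enter at least one number.")
    else if (numbers.zip (PySem.List.slice numbers (some 1) none)).any (fun p => p.1 > p.2) then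
      ("Invalid input", "Binary Search only works on a sorted list. Please enter numbers in increasing order.")
    else match PySem.Int.ofStr? target_input with
      | none => ("Invalid target", "Please enter a whole number as the target.")
      | some target =>
        let fp := pvProbes numbers target (numbers.length + 1) 0 ((numbers.length : Int) - 1)
        let lines := (PySem.List.enumerate fp.2 1).foldl
          (fun acc q => acc ++ pvRender numbers target (q.1, q.2)) []
        match fp.1 with
        | none => ("Not found", PySem.Str.join "\n" (lines ++ [pvNotFoundLine target]))
        | some m => ("Found at index " ++ PySem.Int.toStr m, PySem.Str.join "\n" lines)

-- ===== PRECONDITION & SPEC =====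
def Spec_run_binary_search (user_input : String) (target_input : String) (out : String × String) : Prop := out = run_binary_search_alt user_input target_input
instance (user_input : String) (target_input : String) (out : String × String) : Decidable (Spec_run_binary_search user_input target_input out) := by unfold Spec_run_binary_search; infer_instance

-- ===== CLAIM (what is proved, stated in full; the proofs are below) =====
def Claim_equal_run_binary_search : Prop := ∀ (user_input : String) (target_input : String), Dom_run_binary_search user_input target_input → Spec_run_binary_search user_input target_input (run_binary_search user_input target_input)

-- ===== LEMMAS AND PROOFS =====

-- parsing: B's accumulating loop computes A's comprehension
theorem pvParse_eq (parts : List String) (acc : List Int) :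
    pvParseB parts acc = (pvParseA parts).map (acc ++ ·) := by
  induction parts generalizing acc with
  | nil => simp [pvParseA, pvParseB]
  | cons x rest ih =>
    simp only [pvParseA, pvParseB]
    split
    · exact ih acc
    · cases h : PySem.Int.ofStr? (PySem.Str.strip x) with
      | none => rfl
      | some n =>
        simp only []
        rw [ih (acc ++ [n])]
        cases pvParseA rest <;> simp

-- sortedness: the adjacent-pair test is (the negation of) Pairwise (≤)
theorem pvAdj (l : List Int) :
    ((l.zip (l.drop 1)).any (fun p => p.1 > p.2) = false) ↔ l.Pairwise (fun a b : Int => a ≤ b) := by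
  induction l with
  | nil => simp
  | cons a t ih =>
    cases t with
    | nil => simp
    | cons b t' =>
      constructor
      · intro h
        simp only [List.drop_succ_cons, List.drop_zero, List.zip_cons_cons, List.any_cons,
          Bool.or_eq_false_iff] at h
        obtain ⟨hab0, hrest⟩ := h
        have hab : a ≤ b := by simpa using hab0
        have hp : (b :: t').Pairwise (fun a b : Int => a ≤ b) := ih.mp (by simpa using hrest)
        rw [List.pairwise_cons]
        refine ⟨fun x hx => ?_, hp⟩
        rcases List.mem_cons.mp hx with rfl | hx
        · exact hab
        · exact le_trans hab ((List.pairwise_cons.mp hp).1 x hx)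
      · intro h
        rw [List.pairwise_cons] at h
        obtain ⟨h1, hp⟩ := h
        simp only [List.drop_succ_cons, List.drop_zero, List.zip_cons_cons, List.any_cons,
          Bool.or_eq_false_iff]
        refine ⟨by simp [h1 b (by simp)], ?_⟩
        simpa using ih.mpr hp

-- the central lemma: A's fused loop = B's probes + rendering, for sufficient fuel
theorem pvLoop_eq (numbers : List Int) (target : Int) :
    ∀ (fuel : Nat) (left right sn : Int) (steps : List String),
      (right - left + 1).toNat < fuel →
      pvBssLoop numbers target fuel steps left right sn =
        (let fp := pvProbes numbers target fuel left right
         let lines := steps ++ (PySem.List.enumerate fp.2 sn).foldl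
            (fun acc q => acc ++ pvRender numbers target (q.1, q.2)) []
         match fp.1 with
         | none => ("Not found", PySem.Str.join "\n" (lines ++ [pvNotFoundLine target]))
         | some m => ("Found at index " ++ PySem.Int.toStr m, PySem.Str.join "\n" lines)) := by
  intro fuel
  induction fuel with
  | zero => intro _ _ _ _ hf; omega
  | succ f ih =>
    intro left right sn steps hf
    by_cases hlr : left ≤ right
    · have hnot : ¬ left > right := by omega
      have hfd : PySem.Int.floordiv (left + right) 2 = (left + right) / 2 :=
        PySem.Int.floordiv_eq_ediv_of_pos (by norm_num)
      have hmid := PySem.Int.floordiv_two_mid_bounds hlr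
      rw [hfd] at hmid
      set mid := (left + right) / 2 with hmiddef
      set v := PySem.List.pyGetD numbers mid 0 with hvdef
      by_cases hv : v = target
      · rw [show pvBssLoop numbers target (f+1) steps left right sn =
            ("Found at index " ++ PySem.Int.toStr mid,
             PySem.Str.join "\n" (steps ++ [pvStepLine sn left right mid v] ++ [pvFoundLine target mid])) from by
          simp [pvBssLoop, hlr, ← hmiddef, ← hvdef, hv]]
        rw [show pvProbes numbers target (f+1) left right = (some mid, [(left, right, mid)]) from by
          simp [pvProbes, hnot, ← hmiddef, ← hvdef, hv]]
        simp [PySem.List.enumerate, pvRender, ← hvdef, hv]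
      · by_cases hvlt : v < target
        · have hf' : (right - (mid + 1) + 1).toNat < f := by omega
          rw [show pvBssLoop numbers target (f+1) steps left right sn =
              pvBssLoop numbers target f
                (steps ++ [pvStepLine sn left right mid v] ++ [pvLessLine v target])
                (mid + 1) right (sn + 1) from by
            simp [pvBssLoop, hlr, ← hmiddef, ← hvdef, hv, hvlt]]
          rw [ih (mid + 1) right (sn + 1) _ hf']
          rw [show pvProbes numbers target (f+1) left right =
              ((pvProbes numbers target f (mid+1) right).1,
               (left, right, mid) :: (pvProbes numbers target f (mid+1) right).2) from by
            simp [pvProbes, hnot, ← hmiddef, ← hvdef, hv, hvlt]]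
          simp only [PySem.List.enumerate_cons, List.foldl_cons, List.nil_append]
          rw [PySem.List.foldl_append_eq_flatMap, PySem.List.foldl_append_eq_flatMap]
          simp only [pvRender, ← hvdef, hvlt]
          cases (pvProbes numbers target f (mid+1) right).1 <;> simp [hv]
        · have hvgt : ¬ v < target := hvlt
          have hf' : ((mid - 1) - left + 1).toNat < f := by omega
          rw [show pvBssLoop numbers target (f+1) steps left right sn =
              pvBssLoop numbers target f
                (steps ++ [pvStepLine sn left right mid v] ++ [pvGreaterLine v target])
                left (mid - 1) (sn + 1) from by
            simp [pvBssLoop, hlr, ← hmiddef, ← hvdef, hv, hvgt]]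
          rw [ih left (mid - 1) (sn + 1) _ hf']
          rw [show pvProbes numbers target (f+1) left right =
              ((pvProbes numbers target f left (mid-1)).1,
               (left, right, mid) :: (pvProbes numbers target f left (mid-1)).2) from by
            simp [pvProbes, hnot, ← hmiddef, ← hvdef, hv, hvgt]]
          simp only [PySem.List.enumerate_cons, List.foldl_cons, List.nil_append]
          rw [PySem.List.foldl_append_eq_flatMap, PySem.List.foldl_append_eq_flatMap]
          simp only [pvRender, ← hvdef, hvgt]
          cases (pvProbes numbers target f left (mid-1)).1 <;> simp [hv]
    · have hgt : left > right := by omega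
      simp [pvBssLoop, pvProbes, hlr, hgt]

-- ===== VERDICT (by name: the statement is the Claim_ definition above) =====
theorem run_binary_search_spec : Claim_equal_run_binary_search := by
  intro u t _
  show run_binary_search u t = run_binary_search_alt u t
  unfold run_binary_search run_binary_search_alt
  rw [pvParse_eq]
  cases pvParseA ((PySem.Str.split? u ",").getD []) with
  | none => rfl
  | some numbers =>
    simp only [Option.map_some, List.nil_append]
    by_cases hnil : numbers = []
    · simp [hnil]
    · simp only [if_neg hnil]
      by_cases hp : numbers.Pairwise (fun a b : Int => a ≤ b)
      · have hA : ¬ numbers ≠ PySem.List.sorted numbers (fun x => x) false := by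
          simp [PySem.List.sorted_eq_self_of_pairwise numbers _ hp]
        have hB : (numbers.zip (PySem.List.slice numbers (some 1) none)).any
            (fun p => p.1 > p.2) = false := by
          rw [PySem.List.slice_from numbers (by norm_num : (0:Int) ≤ 1)]
          simpa using (pvAdj numbers).mpr hp
        rw [if_neg hA, hB]
        simp only [Bool.false_eq_true, if_false]
        cases PySem.Int.ofStr? t with
        | none => rfl
        | some target =>
          dsimp only
          have hlen : (((numbers.length : Int) - 1) - 0 + 1).toNat < numbers.length + 1 := by
            omega
          rw [pvLoop_eq numbers target (numbers.length + 1) 0 ((numbers.length : Int) - 1) 1 [] hlen]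
          simp only [List.nil_append]
      · have hA : numbers ≠ PySem.List.sorted numbers (fun x => x) false := by
          intro heq
          apply hp
          have := PySem.List.sorted_pairwise (xs := numbers) (key := fun x => x)
          rw [← heq] at this
          exact this
        have hB : (numbers.zip (PySem.List.slice numbers (some 1) none)).any
            (fun p => p.1 > p.2) = true := by
          rw [PySem.List.slice_from numbers (by norm_num : (0:Int) ≤ 1)]
          cases hc : ((numbers.zip (numbers.drop (1:Int).toNat)).any fun p => p.1 > p.2) with
          | true => rfl
          | false => exact absurd ((pvAdj numbers).mp (by simpa using hc)) hp
        rw [if_pos hA, hB]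
        simp only [if_true]
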